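-- pv_equiv track=rewrite | github.com/gadevito/LLMDDI | feature_eng/feature_eng/ddi/gs_ddi.py | has_approved_group
-- ===== SOURCE A (Python) =====
-- def has_approved_group(d):
--     gr = d['groups']
--     approved_or_experimental = False
--     is_withdrawn_or_illicit = False
--     for g in gr:
--         if g in (1,2):
--             approved_or_experimental = True
--         elif g in (0,3):
--             is_withdrawn_or_illicit = True
--             break
--     return approved_or_experimental and not is_withdrawn_or_illicit
-- ===== SOURCE B (Python) =====
-- def has_approved_group(d):
--     gr = d['groups']
--     has_approved = any(g in (1, 2) for g in gr)
--     no_withdrawn = all(g not in (0, 3) for g in gr)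
--     return has_approved and no_withdrawn
-- ===== Notes on version B (the rewrite author's own statement) =====
-- stated objective: simpler
-- what changed: Replaces the single interleaved flag-setting loop with early break by two independent quantifier passes (any approved, no withdrawn), whose conjunction is the result.
import Mathlib
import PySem

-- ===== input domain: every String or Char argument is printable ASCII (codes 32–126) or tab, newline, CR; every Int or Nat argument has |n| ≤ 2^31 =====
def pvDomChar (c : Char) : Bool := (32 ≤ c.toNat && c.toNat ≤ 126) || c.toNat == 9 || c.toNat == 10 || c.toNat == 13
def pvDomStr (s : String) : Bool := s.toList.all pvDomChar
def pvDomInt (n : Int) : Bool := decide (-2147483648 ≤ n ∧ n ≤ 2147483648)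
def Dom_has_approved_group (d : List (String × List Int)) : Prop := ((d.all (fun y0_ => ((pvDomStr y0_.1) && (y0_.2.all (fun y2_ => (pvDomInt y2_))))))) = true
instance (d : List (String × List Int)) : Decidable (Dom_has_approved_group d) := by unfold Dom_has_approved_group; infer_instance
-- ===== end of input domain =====

-- B replaces A's interleaved flag loop (with early break) by two independent
-- quantified scans over the groups list; objective: simpler.


-- ===== PORT A =====
-- A's for-loop with two flags and the early 'break' (the break returns the
-- final expression 'approved && !withdrawn' with withdrawn = true, i.e. false).
def hagLoopA : List Int → Bool → Bool → Bool
  | [], approved, withdrawn => approved && !withdrawn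
  | g :: t, approved, withdrawn =>
      if g = 1 ∨ g = 2 then hagLoopA t true withdrawn
      else if g = 0 ∨ g = 3 then approved && !true
      else hagLoopA t approved withdrawn

def has_approved_group (d : List (String × List Int)) : Bool :=
  let gr := (PySem.Dict.mk d).getD "groups" []
  hagLoopA gr false false

-- ===== PORT B =====
def has_approved_group_alt (d : List (String × List Int)) : Bool :=
  let gr := (PySem.Dict.mk d).getD "groups" []
  let has_approved := gr.any (fun g => g == 1 || g == 2)
  let no_withdrawn := gr.all (fun g => !(g == 0 || g == 3))
  has_approved && no_withdrawn

-- ===== PRECONDITION & SPEC =====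
-- Pre_ excludes exactly the inputs where Python A raises KeyError: no 'groups' key.
def Pre_has_approved_group (d : List (String × List Int)) : Prop :=
  ((PySem.Dict.mk d).get? "groups").isSome
instance (d : List (String × List Int)) : Decidable (Pre_has_approved_group d) := by
  unfold Pre_has_approved_group; infer_instance

def pvWitness_has_approved_group : (List (String × List Int)) := [("groups", [1, 0])]

def Spec_has_approved_group (d : List (String × List Int)) (out : Bool) : Prop := out = has_approved_group_alt d
instance (d : List (String × List Int)) (out : Bool) : Decidable (Spec_has_approved_group d out) := by unfold Spec_has_approved_group; infer_instance

-- ===== CLAIM (what is proved, stated in full; the proofs are below) =====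
def Claim_equal_has_approved_group : Prop := ∀ (d : List (String × List Int)), Dom_has_approved_group d → Pre_has_approved_group d → Spec_has_approved_group d (has_approved_group d)

-- ===== LEMMAS AND PROOFS =====
lemma hagLoopA_eq (gr : List Int) (a : Bool) :
    hagLoopA gr a false =
      ((a || gr.any (fun g => g == 1 || g == 2)) &&
        gr.all (fun g => !(g == 0 || g == 3))) := by
  induction gr generalizing a with
  | nil => simp [hagLoopA]
  | cons g t ih =>
    simp only [hagLoopA]
    by_cases h12 : g = 1 ∨ g = 2
    · simp only [if_pos h12, ih]
      rcases h12 with h | h <;> subst h <;> simp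
    · by_cases h03 : g = 0 ∨ g = 3
      · simp only [if_neg h12, if_pos h03]
        rcases h03 with h | h <;> subst h <;> simp
      · simp only [if_neg h12, if_neg h03, ih]
        push Not at h12 h03
        have e1 : (g == (1:Int)) = false := by simp [h12.1]
        have e2 : (g == (2:Int)) = false := by simp [h12.2]
        have e3 : (g == (0:Int)) = false := by simp [h03.1]
        have e4 : (g == (3:Int)) = false := by simp [h03.2]
        simp [e1, e2, e3, e4]

-- ===== VERDICT (by name: the statement is the Claim_ definition above) =====
theorem has_approved_group_spec : Claim_equal_has_approved_group := by
  intro d _ _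
  unfold Spec_has_approved_group has_approved_group has_approved_group_alt
  simp [hagLoopA_eq]
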